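-- pv_equiv track=rewrite | github.com/jinxuan-owyong/advent-of-code | 2023/05/solution2.py | filterValidSeeds
-- ===== SOURCE A (Python) =====
-- from typing import Dict, List, Tuple
-- import bisect
--
-- def filterValidSeeds(seeds: List[int], validRanges: List[Tuple[int, int]]):
--     result = []
--
--     for i in range(0, len(seeds), 2):
--         seedStart, seedSize = seeds[i], seeds[i + 1]
--         seedEnd = seedStart + seedSize - 1
--         idx = bisect.bisect_left(validRanges, seedStart, key=lambda x: x[0] + x[1])
--         if idx == len(validRanges):
--             continue
--         validStart, validSize = validRanges[idx]
--         validEnd = validStart + validSize - 1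
--         seedDistance = seedStart - validStart
--         # if seedEnd <= validEnd:
--         #     result.append((seedStart, seedSize))
--         #     continue
--         # validStart <= seedStart always
--
--         if validStart <= seedStart:
--             if validEnd > seedEnd:
--                 result.append((seedStart, seedSize))
--             else:
--                 result.append((seedStart, validSize - seedDistance))
--         else:
--             if validEnd <= seedEnd:
--                 result.append((validStart, validSize))
--             else:
--                 seedDistance = validStart - seedStart
--                 result.append((validStart, seedSize - seedDistance))
--
--
--
--
--
--
--
--
--
--
--
--
--         # if validStart == seedStart:
--         #     # valid: |            |
--         #     # seed : |       |    |        |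
--         #     if seedSize <= validSize:
--         #         result.append((seedStart, seedSize))
--         #     else:
--         #         result.append((seedStart, validSize))
--         # elif validStart < seedStart:
--         #     # valid: |               |
--         #     # seed :    |       |    |        |
--         #     seedDistance = seedStart - validStart
--         #     if seedSize <= (validSize - seedDistance):
--         #         result.append((seedStart, seedSize))
--         #     else:
--         #         result.append((seedStart, validSize - seedDistance))
--         # else:
--         #     raise Exception("Error")
--
--     return result
-- ===== SOURCE B (Python) =====
-- def filterValidSeeds(seeds, validRanges):
--     # Precompute the search keys once, replace the stdlib bisect with a
--     # hand-written recursive binary search, clip by plain interval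
--     # intersection (max/min) instead of a four-way branch, and build the
--     # output back-to-front (reverse traversal of the seed pairs, reversed
--     # once at the end).
--     keys = [s + n for s, n in validRanges]
--
--     def locate(x, lo, hi):
--         if lo >= hi:
--             return lo
--         mid = (lo + hi) // 2
--         if keys[mid] < x:
--             return locate(x, mid + 1, hi)
--         return locate(x, lo, mid)
--
--     out = []
--     for i in range(len(seeds) - 2, -1, -2):
--         start, size = seeds[i], seeds[i + 1]
--         end = start + size - 1
--         j = locate(start, 0, len(keys))
--         if j < len(keys):
--             vs, vn = validRanges[j]
--             lo, hi = max(start, vs), min(end, vs + vn - 1)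
--             out.append((lo, hi - lo + 1))
--     out.reverse()
--     return out
-- ===== Notes on version B (the rewrite author's own statement) =====
-- stated objective: alternative
-- what changed: B precomputes the key list once, replaces the stdlib bisect call with its own recursive binary search over that list, traverses the seed pairs back-to-front building the output in reverse (one final reversal), and clips by a direct max/min interval intersection instead of A's four-way branch analysis.
import Mathlib
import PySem

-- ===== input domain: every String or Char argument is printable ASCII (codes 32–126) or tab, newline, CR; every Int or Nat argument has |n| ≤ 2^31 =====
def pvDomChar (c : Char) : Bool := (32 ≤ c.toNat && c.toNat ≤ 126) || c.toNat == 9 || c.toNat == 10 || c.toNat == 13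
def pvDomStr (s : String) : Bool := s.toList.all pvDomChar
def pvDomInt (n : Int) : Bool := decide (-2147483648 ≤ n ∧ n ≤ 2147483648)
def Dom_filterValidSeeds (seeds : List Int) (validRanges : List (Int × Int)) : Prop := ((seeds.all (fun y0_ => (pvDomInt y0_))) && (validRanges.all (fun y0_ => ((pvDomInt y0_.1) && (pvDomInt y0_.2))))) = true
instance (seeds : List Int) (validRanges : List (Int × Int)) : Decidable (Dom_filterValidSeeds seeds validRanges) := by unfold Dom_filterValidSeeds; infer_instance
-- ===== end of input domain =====

-- B precomputes the key list, uses its own recursive binary search instead of the stdlib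
-- bisect call, traverses the seed pairs back-to-front (one final reversal) and clips by a
-- direct max/min interval intersection instead of A's four-way branch; objective: alternative.

-- ===== PORT A =====
-- index loop 'for i in range(0, len(seeds), 2)' with an appended-to result accumulator;
-- bisect.bisect_left(validRanges, x, key=λr. r[0]+r[1]) = PySem.List.bisectLeft on the mapped keys
def aLoop (seeds : List Int) (validRanges : List (Int × Int)) (i : Nat)
    (result : List (Int × Int)) : List (Int × Int) :=
  if _h : i < seeds.length then
    match seeds[i]?, seeds[i+1]? with
    | some seedStart, some seedSize =>
      let seedEnd := seedStart + seedSize - 1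
      let idx := PySem.List.bisectLeft (validRanges.map (fun r => r.1 + r.2)) seedStart
      if h2 : idx < validRanges.length then
        let validStart := (validRanges[idx]).1
        let validSize := (validRanges[idx]).2
        let validEnd := validStart + validSize - 1
        let seedDistance := seedStart - validStart
        let entry :=
          if validStart ≤ seedStart then
            if validEnd > seedEnd then (seedStart, seedSize)
            else (seedStart, validSize - seedDistance)
          else
            if validEnd ≤ seedEnd then (validStart, validSize)
            else (validStart, seedSize - (validStart - seedStart))
        aLoop seeds validRanges (i + 2) (result ++ [entry])
      else aLoop seeds validRanges (i + 2) result  -- idx == len(validRanges): continue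
    | _, _ => result  -- seeds[i+1] IndexError (odd length); excluded by Pre_
  else result
termination_by seeds.length - i

def filterValidSeeds (seeds : List Int) (validRanges : List (Int × Int)) : List (Int × Int) :=
  aLoop seeds validRanges 0 []

-- ===== PORT B =====
-- B's hand-written recursive binary search 'locate' (closure over keys in Source B);
-- keys[mid] is always in range at a reachable call (lo < hi ≤ len(keys)), the 'none'
-- branch is unreachable there
def locate (keys : List Int) (x : Int) (lo hi : Nat) : Nat :=
  if _h : lo < hi then
    match keys[(lo + hi) / 2]? with
    | some y =>
      if y < x then locate keys x ((lo + hi) / 2 + 1) hi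
      else locate keys x lo ((lo + hi) / 2)
    | none => lo
  else lo
termination_by hi - lo
decreasing_by all_goals omega

-- 'for i in range(len(seeds)-2, -1, -2)' appending, then out.reverse();
-- len(keys) = len(validRanges), so 'j < len(keys)' is ported as 'j < validRanges.length'
def filterValidSeeds_alt (seeds : List Int) (validRanges : List (Int × Int)) : List (Int × Int) :=
  let keys := validRanges.map (fun r => r.1 + r.2)
  ((PySem.List.pyRange ((seeds.length : Int) - 2) (-1) (-2)).foldl (fun out i =>
      match PySem.List.pyGet? seeds i, PySem.List.pyGet? seeds (i + 1) with
      | some start, some size =>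
        let e := start + size - 1
        let j := locate keys start 0 keys.length
        if h : j < validRanges.length then
          let lo := max start (validRanges[j]).1
          let hi := min e ((validRanges[j]).1 + (validRanges[j]).2 - 1)
          out ++ [(lo, hi - lo + 1)]
        else out
      | _, _ => out) []).reverse

-- ===== PRECONDITION & SPEC =====
-- A raises IndexError (seeds[i+1]) on odd-length seed lists; Pre_ keeps even lengths.
def Pre_filterValidSeeds (seeds : List Int) (validRanges : List (Int × Int)) : Prop :=
  seeds.length % 2 = 0
instance (seeds : List Int) (validRanges : List (Int × Int)) : Decidable (Pre_filterValidSeeds seeds validRanges) := by unfold Pre_filterValidSeeds; infer_instance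

def pvWitness_filterValidSeeds : List Int × (List (Int × Int)) := ([3, 5], [(2, 10)])

def Spec_filterValidSeeds (seeds : List Int) (validRanges : List (Int × Int)) (out : List (Int × Int)) : Prop := out = filterValidSeeds_alt seeds validRanges
instance (seeds : List Int) (validRanges : List (Int × Int)) (out : List (Int × Int)) : Decidable (Spec_filterValidSeeds seeds validRanges out) := by unfold Spec_filterValidSeeds; infer_instance

-- ===== CLAIM (what is proved, stated in full; the proofs are below) =====
def Claim_equal_filterValidSeeds : Prop := ∀ (seeds : List Int) (validRanges : List (Int × Int)), Dom_filterValidSeeds seeds validRanges → Pre_filterValidSeeds seeds validRanges → Spec_filterValidSeeds seeds validRanges (filterValidSeeds seeds validRanges)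

-- ===== LEMMAS AND PROOFS =====

-- common reference form: forward structural recursion over the seed pairs,
-- stdlib bisect lookup, max/min intersection entry
def fwd (seeds : List Int) (validRanges : List (Int × Int)) : List (Int × Int) :=
  match seeds with
  | start :: size :: rest =>
    let e := start + size - 1
    let idx := PySem.List.bisectLeft (validRanges.map (fun r => r.1 + r.2)) start
    (if h : idx < validRanges.length then
      let lo := max start (validRanges[idx]).1
      let hi := min e ((validRanges[idx]).1 + (validRanges[idx]).2 - 1)
      [(lo, hi - lo + 1)]
     else []) ++ fwd rest validRanges
  | _ => []

-- B's recursive binary search computes exactly PySem.List.bisectLeft's fueled loop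
lemma locate_eq_loop (keys : List Int) (x : Int) :
    ∀ (fuel lo hi : Nat), hi - lo ≤ fuel →
    locate keys x lo hi = PySem.List.bisectLeftLoop keys x fuel lo hi := by
  intro fuel
  induction fuel with
  | zero =>
    intro lo hi hle
    rw [locate]
    have : ¬ lo < hi := by omega
    simp [this, PySem.List.bisectLeftLoop]
  | succ n ih =>
    intro lo hi hle
    rw [locate, PySem.List.bisectLeftLoop]
    by_cases h : lo < hi
    · simp only [dif_pos h, if_pos h]
      cases keys[(lo + hi) / 2]? with
      | none => rfl
      | some y =>
        by_cases hy : y < x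
        · simp only [if_pos hy]
          exact ih _ _ (by omega)
        · simp only [if_neg hy]
          exact ih _ _ (by omega)
    · simp [h]

lemma locate_eq_bisect (keys : List Int) (x : Int) :
    locate keys x 0 keys.length = PySem.List.bisectLeft keys x := by
  rw [PySem.List.bisectLeft]
  exact locate_eq_loop keys x keys.length 0 keys.length (by omega)

-- A's four-way clipped entry is the plain interval intersection B computes
lemma entry_eq_intersection (s sz vs vsz : Int) :
    (if vs ≤ s then
       if vs + vsz - 1 > s + sz - 1 then (s, sz) else (s, vsz - (s - vs))
     else
       if vs + vsz - 1 ≤ s + sz - 1 then (vs, vsz) else (vs, sz - (vs - s)))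
    = (max s vs, min (s + sz - 1) (vs + vsz - 1) - max s vs + 1) := by
  split_ifs <;> simp only [Prod.mk.injEq] <;> constructor <;> omega

-- shifting A's index loop past one consumed pair
lemma aLoop_shift (n : Nat) : ∀ (rest : List Int) (i : Nat), rest.length - i ≤ n →
    ∀ (s sz : Int) (vrs : List (Int × Int)) (res : List (Int × Int)),
    aLoop (s :: sz :: rest) vrs (i + 2) res = aLoop rest vrs i res := by
  induction n with
  | zero =>
    intro rest i hle s sz vrs res
    rw [aLoop, aLoop]
    have : ¬ i < rest.length := by omega
    simp [this, show ¬ i + 2 < rest.length + 2 from by omega]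
  | succ n ih =>
    intro rest i hle s sz vrs res
    rw [aLoop, aLoop]
    by_cases hi : i < rest.length
    · simp only [List.length_cons]
      rw [dif_pos (show i + 2 < rest.length + 1 + 1 by omega), dif_pos hi]
      have h1 : (s :: sz :: rest)[i + 2]? = rest[i]? := by simp
      have h2 : (s :: sz :: rest)[i + 2 + 1]? = rest[i + 1]? := by simp
      rw [h1, h2]
      cases rest[i]? with
      | none => rfl
      | some a =>
        cases rest[i+1]? with
        | none => rfl
        | some b =>
          simp only []
          split
          · exact ih rest (i + 2) (by omega) s sz vrs _
          · exact ih rest (i + 2) (by omega) s sz vrs _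
    · simp [hi, show ¬ i + 2 < rest.length + 2 from by omega]

lemma aLoop_eq_fwd (n : Nat) : ∀ (seeds : List Int), seeds.length ≤ n →
    seeds.length % 2 = 0 →
    ∀ (vrs : List (Int × Int)) (res : List (Int × Int)),
    aLoop seeds vrs 0 res = res ++ fwd seeds vrs := by
  induction n with
  | zero =>
    intro seeds hlen _ vrs res
    have : seeds = [] := List.eq_nil_of_length_eq_zero (by omega)
    subst this
    rw [aLoop]; simp [fwd]
  | succ n ih =>
    intro seeds hlen hev vrs res
    match seeds with
    | [] => rw [aLoop]; simp [fwd]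
    | [x] => simp at hev
    | s :: sz :: rest =>
      rw [aLoop]
      simp only [List.length_cons, show (0 < rest.length + 1 + 1) = True from eq_true (by omega),
        dif_pos, List.getElem?_cons_zero, List.getElem?_cons_succ]
      simp only [fwd]
      have hrest : rest.length ≤ n := by simp at hlen; omega
      have hrev : rest.length % 2 = 0 := by simp at hev ⊢; omega
      split
      · rename_i h2
        rw [aLoop_shift rest.length rest 0 (by omega) s sz vrs _,
            ih rest hrest hrev vrs _]
        rw [entry_eq_intersection]
        simp [List.append_assoc]
      · rename_i h2
        rw [aLoop_shift rest.length rest 0 (by omega) s sz vrs _,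
            ih rest hrest hrev vrs _]
        simp

-- one chunk of B's loop body: what it appends for pair index i
def chunk (seeds : List Int) (vrs : List (Int × Int)) (i : Int) : List (Int × Int) :=
  match PySem.List.pyGet? seeds i, PySem.List.pyGet? seeds (i + 1) with
  | some start, some size =>
    let e := start + size - 1
    let j := locate (vrs.map (fun r => r.1 + r.2)) start 0 (vrs.map (fun r => r.1 + r.2)).length
    if h : j < vrs.length then
      [(max start (vrs[j]).1, min e ((vrs[j]).1 + (vrs[j]).2 - 1) - max start (vrs[j]).1 + 1)]
    else []
  | _, _ => []

lemma chunk_reverse (seeds : List Int) (vrs : List (Int × Int)) (i : Int) :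
    (chunk seeds vrs i).reverse = chunk seeds vrs i := by
  unfold chunk
  cases PySem.List.pyGet? seeds i <;> cases PySem.List.pyGet? seeds (i + 1) <;> simp
  split <;> simp

-- closed forms of the two ranges, and Python indexing at nonnegative indices
lemma pyGet?_of_nonneg (xs : List Int) (i : Int) (h : 0 ≤ i) :
    PySem.List.pyGet? xs i = xs[i.toNat]? := by
  by_cases h2 : i < (xs.length : Int)
  · simp [PySem.List.pyGet?, PySem.List.pyIdx?, h, h2]
  · simp [PySem.List.pyGet?, PySem.List.pyIdx?, h, h2]

lemma desc_cons (m : Int) (h : 0 ≤ m) :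
    PySem.List.pyRange m (-1) (-2) = m :: PySem.List.pyRange (m - 2) (-1) (-2) := by
  unfold PySem.List.pyRange
  simp only [neg_neg, if_neg (by norm_num : ¬ (-2:Int) = 0), if_neg (by norm_num : ¬ (0:Int) < -2)]
  have hc : (if (-1:Int) < m then ((m - -1 + 2 - 1) / 2).toNat else 0)
      = (if (-1:Int) < m - 2 then ((m - 2 - -1 + 2 - 1) / 2).toNat else 0) + 1 := by
    split <;> split <;> omega
  rw [hc]
  simp only [List.range_succ_eq_map, List.map_cons, List.map_map, Nat.cast_zero]
  congr 1
  · ring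
  · exact List.map_congr_left (fun j _ => by simp only [Function.comp]; push_cast; ring)

lemma asc_form (k : Nat) :
    PySem.List.pyRange 0 (2 * (k : Int)) 2 = (List.range k).map (fun (j : Nat) => 2 * (j : Int)) := by
  rw [PySem.List.pyRange_of_pos 0 (2 * (k : Int)) (by norm_num)]
  have hc : (if (0:Int) < 2 * (k : Int) then ((2 * (k : Int) - 0 + 2 - 1) / 2).toNat else 0) = k := by
    split <;> omega
  rw [hc]
  exact List.map_congr_left (fun j _ => by ring)

lemma asc_snoc (k : Nat) :
    PySem.List.pyRange 0 (2 * (k : Int) + 2) 2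
      = PySem.List.pyRange 0 (2 * (k : Int)) 2 ++ [2 * (k : Int)] := by
  have h : (2 * (k : Int) + 2) = 2 * ((k + 1 : Nat) : Int) := by push_cast; ring
  rw [h, asc_form, asc_form, List.range_succ]
  simp

lemma asc_cons (k : Nat) :
    PySem.List.pyRange 0 (2 * (k : Int) + 2) 2
      = 0 :: (PySem.List.pyRange 0 (2 * (k : Int)) 2).map (· + 2) := by
  have h : (2 * (k : Int) + 2) = 2 * ((k + 1 : Nat) : Int) := by push_cast; ring
  rw [h, asc_form, asc_form, List.range_succ_eq_map]
  simp only [List.map_cons, List.map_map, Nat.cast_zero, mul_zero]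
  congr 1

lemma desc_eq_rev (k : Nat) :
    PySem.List.pyRange (2 * (k : Int) - 2) (-1) (-2)
      = (PySem.List.pyRange 0 (2 * (k : Int)) 2).reverse := by
  induction k with
  | zero => decide
  | succ n ih =>
    have h1 : (2 * ((n + 1 : Nat) : Int) - 2) = 2 * (n : Int) := by push_cast; ring
    have h2 : (2 * ((n + 1 : Nat) : Int)) = 2 * (n : Int) + 2 := by push_cast; ring
    rw [h1, h2, desc_cons _ (by positivity), asc_snoc, ih]
    simp

lemma chunk_shift (s sz : Int) (rest : List Int) (vrs : List (Int × Int)) (i : Int)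
    (hi : 0 ≤ i) : chunk (s :: sz :: rest) vrs (i + 2) = chunk rest vrs i := by
  unfold chunk
  rw [pyGet?_of_nonneg _ (i + 2) (by omega), pyGet?_of_nonneg _ (i + 2 + 1) (by omega),
      pyGet?_of_nonneg rest i hi, pyGet?_of_nonneg rest (i + 1) (by omega)]
  rw [show (i + 2).toNat = i.toNat + 2 from by omega,
      show (i + 2 + 1).toNat = (i + 1).toNat + 2 from by omega]
  simp only [List.getElem?_cons_succ]

lemma chunk_zero (s sz : Int) (rest : List Int) (vrs : List (Int × Int)) :
    chunk (s :: sz :: rest) vrs 0 =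
      (if h : locate (vrs.map (fun r => r.1 + r.2)) s 0 (vrs.map (fun r => r.1 + r.2)).length < vrs.length then
        [(max s (vrs[locate (vrs.map (fun r => r.1 + r.2)) s 0 (vrs.map (fun r => r.1 + r.2)).length]).1,
          min (s + sz - 1) ((vrs[locate (vrs.map (fun r => r.1 + r.2)) s 0 (vrs.map (fun r => r.1 + r.2)).length]).1
            + (vrs[locate (vrs.map (fun r => r.1 + r.2)) s 0 (vrs.map (fun r => r.1 + r.2)).length]).2 - 1)
            - max s (vrs[locate (vrs.map (fun r => r.1 + r.2)) s 0 (vrs.map (fun r => r.1 + r.2)).length]).1 + 1)]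
       else []) := by
  unfold chunk
  rw [pyGet?_of_nonneg _ 0 (by omega), pyGet?_of_nonneg _ (0 + 1) (by omega)]
  norm_num

lemma flat_asc (n : Nat) : ∀ (seeds : List Int), seeds.length ≤ n → seeds.length % 2 = 0 →
    ∀ (vrs : List (Int × Int)),
    (PySem.List.pyRange 0 (seeds.length : Int) 2).flatMap (chunk seeds vrs) = fwd seeds vrs := by
  induction n with
  | zero =>
    intro seeds hlen _ vrs
    have : seeds = [] := List.eq_nil_of_length_eq_zero (by omega)
    subst this
    simp [fwd, PySem.List.pyRange]
  | succ n ih =>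
    intro seeds hlen hev vrs
    match seeds with
    | [] => simp [fwd, PySem.List.pyRange]
    | [x] => simp at hev
    | s :: sz :: rest =>
      obtain ⟨k, hk⟩ : ∃ k, rest.length = 2 * k := by
        simp at hev; exact ⟨rest.length / 2, by omega⟩
      have hlen' : ((s :: sz :: rest).length : Int) = 2 * (k : Int) + 2 := by
        simp [hk]; ring
      rw [hlen', asc_cons]
      simp only [List.flatMap_cons, List.flatMap_map]
      have hshift : (PySem.List.pyRange 0 (2 * k) 2).flatMap
          (fun a => chunk (s :: sz :: rest) vrs (a + 2))
          = (PySem.List.pyRange 0 (2 * k) 2).flatMap (chunk rest vrs) := by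
        apply List.flatMap_congr
        intro i hi
        have h0 : 0 ≤ i := by
          rw [asc_form] at hi
          obtain ⟨j, _, rfl⟩ := List.mem_map.mp hi
          positivity
        exact chunk_shift s sz rest vrs i h0
      rw [hshift, show ((2:Int) * k) = (rest.length : Int) by rw [hk]; push_cast; ring,
          ih rest (by simp at hlen; omega) (by omega) vrs]
      rw [chunk_zero]
      simp only [fwd]
      rw [locate_eq_bisect]

lemma alt_eq_fwd (seeds : List Int) (vrs : List (Int × Int)) (hev : seeds.length % 2 = 0) :
    filterValidSeeds_alt seeds vrs = fwd seeds vrs := by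
  obtain ⟨k, hk⟩ : ∃ k, seeds.length = 2 * k := ⟨seeds.length / 2, by omega⟩
  simp only [filterValidSeeds_alt]
  rw [List.foldl_ext _ (fun out i => out ++ chunk seeds vrs i) []
        (fun out i _ => by
          unfold chunk
          cases h1 : PySem.List.pyGet? seeds i with
          | none => simp [h1]
          | some a =>
            cases h2 : PySem.List.pyGet? seeds (i + 1) with
            | none => simp [h1, h2]
            | some b =>
              simp only [h1, h2]
              split <;> simp),
      PySem.List.foldl_append_eq_flatMap]
  rw [show ((seeds.length : Int) - 2) = (2 * k - 2 : Int) by rw [hk]; push_cast; ring]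
  rw [desc_eq_rev, show ((2:Int) * k) = (seeds.length : Int) by rw [hk]; push_cast; ring]
  rw [List.nil_append, List.flatMap_reverse, List.reverse_reverse]
  calc (PySem.List.pyRange 0 (seeds.length : Int) 2).flatMap (List.reverse ∘ chunk seeds vrs)
      = (PySem.List.pyRange 0 (seeds.length : Int) 2).flatMap (chunk seeds vrs) := by
        apply List.flatMap_congr
        intro i _
        exact chunk_reverse seeds vrs i
    _ = fwd seeds vrs := flat_asc seeds.length seeds le_rfl hev vrs

-- ===== VERDICT (by name: the statement is the Claim_ definition above) =====
theorem filterValidSeeds_spec : Claim_equal_filterValidSeeds := by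
  intro seeds vrs _ hpre
  show filterValidSeeds seeds vrs = filterValidSeeds_alt seeds vrs
  unfold filterValidSeeds
  rw [alt_eq_fwd seeds vrs hpre]
  simpa using aLoop_eq_fwd seeds.length seeds le_rfl hpre vrs []
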